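-- pv_equiv track=rewrite | github.com/shifttogit-deepanshu/DSAA-py | String key sort.py | getTok
-- ===== SOURCE A (Python) =====
-- def getTok(stri, index):
--     key = 0
--     s = ""
--     while index>1 :
--         if stri[key]==" ":
--             index-=1
--         key+=1
--     while (key<len(stri)) and (not stri[key]==" ") :
--         s+=stri[key]
--         key+=1
--     return s
-- ===== SOURCE B (Python) =====
-- def getTok(stri, index):
--     parts = stri.split(' ')
--     return parts[max(index - 1, 0)]
-- ===== Notes on version B (the rewrite author's own statement) =====
-- stated objective: idiomatic
-- what changed: B replaces A's two manual character-by-character while loops (skip index-1 spaces, then accumulate one token) with building all tokens at once via stri.split(' ') and indexing the wanted one (clamped at 0, since A treats every index <= 1 as the first token).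
import Mathlib
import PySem

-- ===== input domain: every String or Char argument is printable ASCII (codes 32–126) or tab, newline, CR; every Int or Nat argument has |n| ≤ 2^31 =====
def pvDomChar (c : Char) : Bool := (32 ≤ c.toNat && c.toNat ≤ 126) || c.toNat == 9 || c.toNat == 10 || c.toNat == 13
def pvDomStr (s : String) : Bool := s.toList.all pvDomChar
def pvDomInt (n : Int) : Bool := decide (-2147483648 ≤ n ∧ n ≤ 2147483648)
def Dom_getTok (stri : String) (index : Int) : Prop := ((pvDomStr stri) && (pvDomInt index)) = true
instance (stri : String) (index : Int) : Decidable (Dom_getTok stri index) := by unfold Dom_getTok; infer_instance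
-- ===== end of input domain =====

-- B replaces A's two character-by-character while loops with split-into-all-tokens-then-index (idiomatic).

-- ===== PORT A =====
-- first while loop: skip characters, decrementing index at each space, until index ≤ 1;
-- stri[key] out of range = IndexError = none (key is only ever incremented from 0, so plain get? is exact)
def getTokSkip (cs : List Char) (index : Int) (key : Nat) : Option Nat :=
  if 1 < index then
    if h : key < cs.length then   -- stri[key] raises IndexError (= none) iff key ≥ len(stri)
      getTokSkip cs (if cs[key] = ' ' then index - 1 else index) (key + 1)
    else none
  else some key
termination_by cs.length - key

-- second while loop: accumulate characters of the current token (s += stri[key])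
def getTokCollect (cs : List Char) (key : Nat) : List Char :=
  if h : key < cs.length then
    if cs[key] = ' ' then [] else cs[key] :: getTokCollect cs (key + 1)
  else []
termination_by cs.length - key

def getTok (stri : String) (index : Int) : String :=
  match getTokSkip stri.toList index 0 with
  | some key => String.ofList (getTokCollect stri.toList key)
  | none => ""   -- unreachable under Pre_getTok (the first loop raised IndexError)

-- ===== PORT B =====
def getTok_alt (stri : String) (index : Int) : String :=
  -- parts = stri.split(' ');  parts[max(index - 1, 0)]
  match PySem.List.pyGet? (PySem.Chars.splitOn stri.toList [' ']) (max (index - 1) 0) with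
  | some t => String.ofList t
  | none => ""   -- unreachable under Pre_getTok (parts[...] raised IndexError)

-- ===== PRECONDITION & SPEC =====
-- A raises IndexError (its first scan runs off the end) exactly when index - 1 exceeds the
-- number of spaces in stri; B's parts[...] raises there too. Pre_ excludes exactly those inputs.
def Pre_getTok (stri : String) (index : Int) : Prop := index - 1 ≤ (stri.toList.count ' ' : Int)
instance (stri : String) (index : Int) : Decidable (Pre_getTok stri index) := by unfold Pre_getTok; infer_instance

def pvWitness_getTok : String × Int := ("ab cd e", 2)

def Spec_getTok (stri : String) (index : Int) (out : String) : Prop := out = getTok_alt stri index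
instance (stri : String) (index : Int) (out : String) : Decidable (Spec_getTok stri index out) := by unfold Spec_getTok; infer_instance

-- ===== CLAIM (what is proved, stated in full; the proofs are below) =====
def Claim_equal_getTok : Prop := ∀ (stri : String) (index : Int), Dom_getTok stri index → Pre_getTok stri index → Spec_getTok stri index (getTok stri index)

-- ===== LEMMAS AND PROOFS =====

-- the sequence of ' '-separated fields of cs (Python's cs.split(' ')), in a proof-friendly form
def pvFields (cs : List Char) : List (List Char) :=
  match cs with
  | [] => [[]]
  | c :: rest => if c = ' ' then [] :: pvFields rest else (pvFields rest).modifyHead (c :: ·)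

theorem pvFields_ne_nil (cs : List Char) : pvFields cs ≠ [] := by
  cases cs with
  | nil => simp [pvFields]
  | cons c rest =>
    simp only [pvFields]
    split
    · simp
    · obtain ⟨g, gs, hg⟩ := List.exists_cons_of_ne_nil (pvFields_ne_nil rest)
      simp [hg, List.modifyHead]

theorem pvFields_length (cs : List Char) : (pvFields cs).length = cs.count ' ' + 1 := by
  induction cs with
  | nil => simp [pvFields]
  | cons c rest ih =>
    simp only [pvFields]
    split <;> simp_all

theorem splitOn_go_eq (l : List Char) : ∀ (fuel : Nat) (cur : List Char) (acc : List (List Char)),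
    l.length + 1 ≤ fuel →
    PySem.Chars.splitOn.go [' '] fuel l cur acc = acc.reverse ++ (pvFields l).modifyHead (cur.reverse ++ ·) := by
  induction l with
  | nil =>
    intro fuel cur acc h
    cases fuel with
    | zero => omega
    | succ f => simp [PySem.Chars.splitOn.go, pvFields]
  | cons c rest ih =>
    intro fuel cur acc h
    cases fuel with
    | zero => simp at h
    | succ f =>
      rw [PySem.Chars.splitOn.go]
      by_cases hc : c = ' '
      · have hpre : [' '].isPrefixOf (c :: rest) = true := by simp [List.isPrefixOf, hc]
        rw [if_pos hpre]
        have hdrop1 : List.drop [' '].length (c :: rest) = rest := by simp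
        rw [hdrop1, ih f [] (cur.reverse :: acc) (by simpa using Nat.succ_le_succ_iff.mp h)]
        obtain ⟨g, gs, hg⟩ := List.exists_cons_of_ne_nil (pvFields_ne_nil rest)
        simp [pvFields, hc, hg, List.modifyHead]
      · have hpre : [' '].isPrefixOf (c :: rest) = false := by
          simp only [List.isPrefixOf, Bool.and_eq_false_iff]
          left; simp [beq_eq_false_iff_ne]; exact fun he => hc he.symm
        rw [if_neg (by simp [hpre])]
        rw [ih f (c :: cur) acc (by simpa using Nat.succ_le_succ_iff.mp h)]
        simp only [pvFields, if_neg hc]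
        congr 1
        obtain ⟨g, gs, hg⟩ := List.exists_cons_of_ne_nil (pvFields_ne_nil rest)
        simp [hg, List.modifyHead]
      
theorem splitOn_eq_pvFields (cs : List Char) : PySem.Chars.splitOn cs [' '] = pvFields cs := by
  rw [PySem.Chars.splitOn, splitOn_go_eq cs (cs.length + 1) [] [] (le_refl _)]
  obtain ⟨g, gs, hg⟩ := List.exists_cons_of_ne_nil (pvFields_ne_nil cs)
  simp [hg, List.modifyHead]

theorem getTokCollect_eq (cs : List Char) : ∀ (key : Nat),
    getTokCollect cs key = (pvFields (cs.drop key)).getD 0 [] := by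
  intro key
  induction hn : cs.length - key using Nat.strong_induction_on generalizing key with
  | _ n ih =>
    rw [getTokCollect]
    by_cases h : key < cs.length
    · rw [dif_pos h]
      have hdrop : cs.drop key = cs[key] :: cs.drop (key + 1) := List.drop_eq_getElem_cons h
      by_cases hc : cs[key] = ' '
      · rw [if_pos hc, hdrop]
        simp [pvFields, hc]
      · rw [if_neg hc, hdrop]
        rw [ih (cs.length - (key + 1)) (by omega) (key + 1) rfl]
        simp only [pvFields, if_neg hc]
        obtain ⟨g, gs, hg⟩ := List.exists_cons_of_ne_nil (pvFields_ne_nil (cs.drop (key + 1)))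
        simp [hg, List.modifyHead]
    · rw [dif_neg h]
      rw [List.drop_of_length_le (by omega)]
      simp [pvFields]

-- the two loops of A together compute field number (index-1).toNat of the rest of the string
theorem getTokMain (cs : List Char) : ∀ (index : Int) (key : Nat),
    (index - 1).toNat ≤ (cs.drop key).count ' ' →
    (match getTokSkip cs index key with
     | some k => getTokCollect cs k
     | none => ([] : List Char)) = (pvFields (cs.drop key)).getD (index - 1).toNat [] := by
  intro index key
  induction hn : cs.length - key using Nat.strong_induction_on generalizing index key with
  | _ n ih =>
    intro hcount
    rw [getTokSkip]
    by_cases hidx : 1 < index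
    · have hsp : 1 ≤ (cs.drop key).count ' ' := by omega
      have hne : (cs.drop key) ≠ [] := by
        intro he; rw [he] at hsp; simp at hsp
      have h : key < cs.length := by
        by_contra hk
        exact hne (List.drop_of_length_le (by omega))
      rw [if_pos hidx, dif_pos h]
      have hdrop : cs.drop key = cs[key] :: cs.drop (key + 1) := List.drop_eq_getElem_cons h
      by_cases hc : cs[key] = ' '
      · have hcnt : List.count ' ' (cs.drop key) = List.count ' ' (cs.drop (key + 1)) + 1 := by
          rw [hdrop, List.count_cons]; simp [hc]
        rw [if_pos hc]
        rw [ih (cs.length - (key + 1)) (by omega) (index - 1) (key + 1) rfl (by omega)]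
        rw [hdrop]
        simp only [pvFields, if_pos hc]
        have : (index - 1).toNat = (index - 1 - 1).toNat + 1 := by omega
        rw [this]
        simp
      · have hcnt : List.count ' ' (cs.drop key) = List.count ' ' (cs.drop (key + 1)) := by
          rw [hdrop, List.count_cons]; simp [hc]
        rw [if_neg hc]
        rw [ih (cs.length - (key + 1)) (by omega) index (key + 1) rfl (by omega)]
        rw [hdrop]
        simp only [pvFields, if_neg hc]
        obtain ⟨g, gs, hg⟩ := List.exists_cons_of_ne_nil (pvFields_ne_nil (cs.drop (key + 1)))
        have h1 : 1 ≤ (index - 1).toNat := by omega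
        rw [hg]
        cases hm : (index - 1).toNat with
        | zero => omega
        | succ m => simp [List.modifyHead]
    · rw [if_neg hidx]
      have h0 : (index - 1).toNat = 0 := by omega
      rw [h0]
      exact getTokCollect_eq cs key

theorem getTok_spec : Claim_equal_getTok := by
  intro stri index _ hpre
  unfold Spec_getTok getTok getTok_alt
  have hcount : (index - 1).toNat ≤ stri.toList.count ' ' := by
    unfold Pre_getTok at hpre; omega
  have hmain := getTokMain stri.toList index 0 (by simpa using hcount)
  simp only [List.drop_zero] at hmain
  have hlen : (index - 1).toNat < (pvFields stri.toList).length := by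
    rw [pvFields_length]; omega
  have hget : PySem.List.pyGet? (PySem.Chars.splitOn stri.toList [' ']) (max (index - 1) 0)
      = some (pvFields stri.toList)[(index - 1).toNat] := by
    have hmx : max (index - 1) 0 = ((index - 1).toNat : Int) := by omega
    rw [splitOn_eq_pvFields, hmx, PySem.List.pyGet?_natCast]
    exact List.getElem?_eq_getElem hlen
  rw [hget]
  cases hskip : getTokSkip stri.toList index 0 with
  | none =>
    rw [hskip] at hmain
    simp only at hmain
    have hnil : (pvFields stri.toList)[(index - 1).toNat] = [] := by
      rw [← List.getD_eq_getElem _ _ hlen]; exact hmain.symm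
    rw [hnil]
  | some k =>
    rw [hskip] at hmain
    simp only at hmain
    simp only [hmain, List.getD_eq_getElem _ _ hlen]
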